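-- pv_equiv track=rewrite | github.com/succdedf/real-time-PLKG-tool | oai_bs.py | Cascade_Tran
-- ===== SOURCE A (Python) =====
-- def Cascade_Tran(K, len):
--     result = 0
--     i = 0
--     while i < len:
--         if i < len//3:
--             index = 3 * i
--         elif i < (len//3) * 2:
--             index = 3 * (i-len//3) + 1
--         else:
--             index = 3 * (i-len//3-len//3) + 2
--         bit = (K >> index) & 1
--         result = result << 2
--         result = result | bit
--         i += 1
--     return result
-- ===== SOURCE B (Python) =====
-- def Cascade_Tran(K, len):
--     # Scatter: place each source bit directly at its final output position
--     # (output slot for loop index i of A is bit-pair 2*(len-1-i)), accumulating by addition.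
--     if len <= 0:
--         return 0
--     t = len // 3
--     r = len - 2 * t
--     result = 0
--     for j in range(t):
--         result += ((K >> (3 * j)) & 1) << (2 * (len - 1 - j))
--         result += ((K >> (3 * j + 1)) & 1) << (2 * (len - 1 - t - j))
--     for j in range(r):
--         result += ((K >> (3 * j + 2)) & 1) << (2 * (len - 1 - 2 * t - j))
--     return result
-- ===== Notes on version B (the rewrite author's own statement) =====
-- stated objective: alternative
-- what changed: Replaces A's gather-style Horner fold (shift the accumulator by 2 and OR in the branch-selected bit each iteration) with a scatter: each source bit is placed directly at its final bit position via a closed-form shift 2*(len-1-slot) and accumulated by addition, in one loop handling the first two segments pairwise plus a tail loop for the third.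
import Mathlib
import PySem

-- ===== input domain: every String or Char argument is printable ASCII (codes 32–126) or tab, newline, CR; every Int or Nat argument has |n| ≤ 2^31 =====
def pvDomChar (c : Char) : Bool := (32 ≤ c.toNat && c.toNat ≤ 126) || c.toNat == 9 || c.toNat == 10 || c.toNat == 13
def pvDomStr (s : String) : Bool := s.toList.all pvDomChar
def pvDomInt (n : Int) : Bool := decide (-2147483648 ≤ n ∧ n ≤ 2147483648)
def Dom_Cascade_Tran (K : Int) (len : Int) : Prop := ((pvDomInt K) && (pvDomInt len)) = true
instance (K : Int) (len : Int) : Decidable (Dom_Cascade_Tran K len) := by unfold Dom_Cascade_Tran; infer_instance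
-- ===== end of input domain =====

-- B replaces A's Horner gather (shift accumulator by 2, OR in the branch-selected bit) with a
-- scatter that adds each source bit directly at its closed-form final position ('alternative'; same cost).

-- ===== PORT A =====
-- while i < len with i += 1 is ported as a fold over pyRange 0 len 1; index is ≥ 0 whenever the
-- loop body runs, so '.toNat' on the shift amount is exact here.
def Cascade_Tran (K : Int) (len : Int) : Int :=
  (PySem.List.pyRange 0 len 1).foldl
    (fun result i =>
      let index : Int :=
        if i < PySem.Int.floordiv len 3 then 3 * i
        else if i < (PySem.Int.floordiv len 3) * 2 then 3 * (i - PySem.Int.floordiv len 3) + 1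
        else 3 * (i - PySem.Int.floordiv len 3 - PySem.Int.floordiv len 3) + 2
      let bit := PySem.Int.band (K >>> index.toNat) 1
      PySem.Int.bor (result <<< 2) bit) 0

-- ===== PORT B =====
-- every shift amount is ≥ 0 on the executed iterations, so '.toNat' is exact here too.
def Cascade_Tran_alt (K : Int) (len : Int) : Int :=
  if len ≤ 0 then 0
  else
    let t := PySem.Int.floordiv len 3
    let r := len - 2 * t
    let res1 := (PySem.List.pyRange 0 t 1).foldl
      (fun result j =>
        let result := result + (PySem.Int.band (K >>> (3 * j).toNat) 1) <<< (2 * (len - 1 - j)).toNat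
        result + (PySem.Int.band (K >>> (3 * j + 1).toNat) 1) <<< (2 * (len - 1 - t - j)).toNat) 0
    (PySem.List.pyRange 0 r 1).foldl
      (fun result j =>
        result + (PySem.Int.band (K >>> (3 * j + 2).toNat) 1) <<< (2 * (len - 1 - 2 * t - j)).toNat) res1

-- ===== PRECONDITION & SPEC =====
def Spec_Cascade_Tran (K : Int) (len : Int) (out : Int) : Prop := out = Cascade_Tran_alt K len
instance (K : Int) (len : Int) (out : Int) : Decidable (Spec_Cascade_Tran K len out) := by unfold Spec_Cascade_Tran; infer_instance

-- ===== CLAIM (what is proved, stated in full; the proofs are below) =====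
def Claim_equal_Cascade_Tran : Prop := ∀ (K : Int) (len : Int), Dom_Cascade_Tran K len → Spec_Cascade_Tran K len (Cascade_Tran K len)

-- ===== LEMMAS AND PROOFS =====

-- the bit the Python reads at source index idx, and A's two step shapes
def pvBit (K idx : Int) : Int := PySem.Int.band (K >>> idx.toNat) 1

def pvStepB (K r idx : Int) : Int := PySem.Int.bor (r <<< 2) (pvBit K idx)

def pvStepA (K t r i : Int) : Int :=
  pvStepB K r (if i < t then 3 * i else if i < t * 2 then 3 * (i - t) + 1 else 3 * (i - t - t) + 2)

theorem pvBit01 (K idx : Int) : pvBit K idx = 0 ∨ pvBit K idx = 1 := by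
  unfold pvBit
  rw [PySem.Int.band_one]
  have h1 := PySem.Int.mod_nonneg (K >>> idx.toNat) (b := 2) (by omega)
  have h2 := PySem.Int.mod_lt (K >>> idx.toNat) (b := 2) (by omega)
  omega

-- Horner value of a list of source indices
def pvS (K : Int) : List Int → Int
  | [] => 0
  | x :: xs => pvBit K x * 4 ^ xs.length + pvS K xs

theorem pvLorNat (m : Nat) : (2 * m) ||| 1 = 2 * m + 1 := by
  apply Nat.eq_of_testBit_eq
  intro i
  cases i with
  | zero => simp [Nat.testBit_zero]
  | succ n =>
    rw [Nat.testBit_succ, Nat.testBit_succ, Nat.or_div_two]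
    simp
    congr 1
    omega

theorem pvLor (r b : Int) (hr : 0 ≤ r) (hb : b = 0 ∨ b = 1) :
    PySem.Int.bor (r <<< 2) b = 4 * r + b := by
  have hsh : r <<< (2 : Int) = 4 * r := by
    rw [show (2 : Int) = ((2 : Nat) : Int) by norm_num, Int.shiftLeft_natCast_right,
        Int.shiftLeft_eq]
    ring
  rcases hb with h | h
  · simp [h, hsh, PySem.Int.bor_zero]
  · rw [h, hsh, PySem.Int.bor_of_nonneg (by omega) (by omega)]
    have h1 : (4 * r).toNat = 2 * (2 * r.toNat) := by omega
    have h2 : (1 : Int).toNat = 1 := rfl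
    rw [h1, h2, pvLorNat]
    omega

theorem pvFold_horner (K : Int) (L : List Int) :
    ∀ r0 : Int, 0 ≤ r0 → L.foldl (pvStepB K) r0 = r0 * 4 ^ L.length + pvS K L := by
  induction L with
  | nil => intro r0 _; simp [pvS]
  | cons x xs ih =>
    intro r0 h
    have hb := pvBit01 K x
    have hstep : pvStepB K r0 x = 4 * r0 + pvBit K x := pvLor r0 _ h hb
    have hnn : 0 ≤ 4 * r0 + pvBit K x := by rcases hb with hb | hb <;> omega
    simp only [List.foldl_cons, hstep, ih _ hnn, pvS, List.length_cons]
    ring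

theorem pvS_append (K : Int) (L1 L2 : List Int) :
    pvS K (L1 ++ L2) = pvS K L1 * 4 ^ L2.length + pvS K L2 := by
  induction L1 with
  | nil => simp [pvS]
  | cons x xs ih =>
    simp only [List.cons_append, pvS, ih, List.length_append]
    rw [pow_add]
    ring

theorem pvS_map_range (K : Int) (f : Nat → Int) :
    ∀ n : Nat, pvS K ((List.range n).map f)
      = ∑ k ∈ Finset.range n, pvBit K (f k) * 4 ^ (n - 1 - k) := by
  intro n
  induction n with
  | zero => simp [pvS]
  | succ n ih =>
    rw [List.range_succ, List.map_append, pvS_append, ih, Finset.sum_range_succ]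
    have hs : ∑ k ∈ Finset.range n, pvBit K (f k) * 4 ^ (n + 1 - 1 - k)
        = ∑ k ∈ Finset.range n, pvBit K (f k) * 4 ^ (n - 1 - k) * 4 := by
      refine Finset.sum_congr rfl ?_
      intro k hk
      have hk' : k < n := Finset.mem_range.1 hk
      rw [show n + 1 - 1 - k = (n - 1 - k) + 1 by omega]
      ring
    rw [hs, ← Finset.sum_mul]
    simp [pvS]

theorem pvSum_map_range (f : Nat → Int) :
    ∀ n : Nat, ((List.range n).map f).sum = ∑ k ∈ Finset.range n, f k := by
  intro n
  induction n with
  | zero => simp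
  | succ n ih => rw [List.range_succ, List.map_append, List.sum_append, Finset.sum_range_succ]; simp [ih]

theorem pvFold_two (g1 g2 : Int → Int) (L : List Int) (r0 : Int) :
    L.foldl (fun r j => r + g1 j + g2 j) r0 = r0 + (L.map (fun j => g1 j + g2 j)).sum := by
  induction L generalizing r0 with
  | nil => simp
  | cons x xs ih => simp only [List.foldl_cons, List.map_cons, List.sum_cons, ih]; ring

-- one phase of A's loop: A's fold over a contiguous index window equals a fold over the mapped range
theorem pv_seg (K t a b m : Int) (e : Int → Int) (hm : b = a + m)
    (h : ∀ r k : Int, 0 ≤ k → k < m → pvStepA K t r (a + k) = pvStepB K r (e k)) :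
    ∀ r : Int, (PySem.List.pyRange a b 1).foldl (pvStepA K t) r
      = ((PySem.List.pyRange 0 m 1).map e).foldl (pvStepB K) r := by
  intro r
  rw [PySem.List.pyRange_one a b, PySem.List.pyRange_one 0 m,
      List.foldl_map, List.foldl_map, List.foldl_map]
  have hn : (b - a).toNat = (m - 0).toNat := by omega
  rw [hn]
  refine List.foldl_ext _ _ r ?_
  intro r' k hk
  have hk' : (k : Int) < m - 0 := by
    have := List.mem_range.1 hk; omega
  have := h r' k (by positivity) (by omega)
  simpa using this

-- A rewritten as one Horner fold over the concatenated source-index lists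
theorem pvA_eq (K len : Int) (h : 0 < len) :
    Cascade_Tran K len
      = ((PySem.List.pyRange 0 (PySem.Int.floordiv len 3) 1).map (fun j => 3 * j)
        ++ (PySem.List.pyRange 0 (PySem.Int.floordiv len 3) 1).map (fun j => 3 * j + 1)
        ++ (PySem.List.pyRange 0 (len - 2 * PySem.Int.floordiv len 3) 1).map (fun j => 3 * j + 2)).foldl
          (pvStepB K) 0 := by
  unfold Cascade_Tran
  have ht0 : 0 ≤ PySem.Int.floordiv len 3 := by
    rw [PySem.Int.floordiv_eq_ediv_of_pos (by omega)]
    exact Int.ediv_nonneg (by omega) (by omega)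
  have h3t : PySem.Int.floordiv len 3 * 3 ≤ len :=
    (PySem.Int.le_floordiv_iff_mul_le (by omega)).1 (le_refl _)
  show (PySem.List.pyRange 0 len 1).foldl (pvStepA K (PySem.Int.floordiv len 3)) 0 = _
  generalize hT : PySem.Int.floordiv len 3 = t at *
  rw [PySem.List.pyRange_one_append 0 t len ht0 (by omega),
      PySem.List.pyRange_one_append t (t * 2) len (by omega) (by omega),
      List.foldl_append, List.foldl_append, List.foldl_append, List.foldl_append]
  rw [pv_seg K t 0 t t (fun j => 3 * j) (by ring)
        (fun r k h0 hk => by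
          unfold pvStepA
          rw [if_pos (by omega)]
          norm_num)]
  rw [pv_seg K t t (t * 2) t (fun j => 3 * j + 1) (by ring)
        (fun r k h0 hk => by
          unfold pvStepA
          rw [if_neg (by omega), if_pos (by omega)]
          have he : 3 * (t + k - t) + 1 = 3 * k + 1 := by ring
          rw [he])]
  rw [pv_seg K t (t * 2) len (len - 2 * t) (fun j => 3 * j + 2) (by ring)
        (fun r k h0 hk => by
          unfold pvStepA
          rw [if_neg (by omega), if_neg (by omega)]
          have he : 3 * (t * 2 + k - t - t) + 2 = 3 * k + 2 := by ring
          rw [he])]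

theorem pvB_eq (K len : Int) (h : ¬ len ≤ 0) :
    Cascade_Tran_alt K len =
      (PySem.List.pyRange 0 (len - 2 * PySem.Int.floordiv len 3) 1).foldl
        (fun result j =>
          result + (PySem.Int.band (K >>> (3 * j + 2).toNat) 1)
            <<< (2 * (len - 1 - 2 * PySem.Int.floordiv len 3 - j)).toNat)
        ((PySem.List.pyRange 0 (PySem.Int.floordiv len 3) 1).foldl
          (fun result j =>
            result + (PySem.Int.band (K >>> (3 * j).toNat) 1) <<< (2 * (len - 1 - j)).toNat
              + (PySem.Int.band (K >>> (3 * j + 1).toNat) 1)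
                <<< (2 * (len - 1 - PySem.Int.floordiv len 3 - j)).toNat) 0) := by
  unfold Cascade_Tran_alt
  rw [if_neg h]

theorem cascade_main : ∀ (K len : Int), Cascade_Tran K len = Cascade_Tran_alt K len := by
  intro K len
  by_cases h : len ≤ 0
  · unfold Cascade_Tran Cascade_Tran_alt
    rw [PySem.List.pyRange_one_eq_nil h, if_pos h]
    rfl
  · have hlen : 0 < len := by omega
    have ht0 : 0 ≤ PySem.Int.floordiv len 3 := by
      rw [PySem.Int.floordiv_eq_ediv_of_pos (by omega)]
      exact Int.ediv_nonneg (by omega) (by omega)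
    have h3t : PySem.Int.floordiv len 3 * 3 ≤ len :=
      (PySem.Int.le_floordiv_iff_mul_le (by omega)).1 (le_refl _)
    have hlt : len < (PySem.Int.floordiv len 3 + 1) * 3 :=
      (PySem.Int.floordiv_lt_iff_lt_mul (a := len) (b := 3) (q := PySem.Int.floordiv len 3 + 1)
        (by omega)).1 (by omega)
    rw [pvA_eq K len hlen, pvB_eq K len h]
    generalize hT : PySem.Int.floordiv len 3 = t at *
    obtain ⟨T, hTn⟩ : ∃ T : Nat, t = (T : Int) := ⟨t.toNat, by omega⟩
    obtain ⟨R, hRn⟩ : ∃ R : Nat, len - 2 * t = (R : Int) := ⟨(len - 2 * t).toNat, by omega⟩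
    have hN : len = 2 * (T : Int) + (R : Int) := by omega
    subst hTn
    rw [pvFold_horner K _ 0 (le_refl 0), List.append_assoc, pvS_append, pvS_append]
    rw [pvFold_two, PySem.List.foldl_add]
    rw [hRn]
    rw [PySem.List.pyRange_one 0 ((T : Int)), PySem.List.pyRange_one 0 ((R : Int))]
    simp only [List.map_map, Function.comp_def, sub_zero, Int.toNat_natCast, zero_add,
      List.length_map, List.length_range, zero_mul, zero_add]
    rw [pvS_map_range, pvS_map_range, pvS_map_range, pvSum_map_range, pvSum_map_range]
    rw [Finset.sum_add_distrib]
    simp only [List.length_append, List.length_map, List.length_range]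
    simp only [pvBit, Int.shiftRight_natCast_right, Int.shiftLeft_eq]
    rw [Finset.sum_mul, Finset.sum_mul]
    have h1 : ∑ i ∈ Finset.range T, PySem.Int.band (K >>> (3 * (i : Int)).toNat) 1 * 4 ^ (T - 1 - i) * 4 ^ (T + R)
        = ∑ i ∈ Finset.range T, PySem.Int.band (K >>> (3 * (i : Int)).toNat) 1 * 2 ^ (2 * (len - 1 - (i : Int))).toNat := by
      refine Finset.sum_congr rfl ?_
      intro k hk
      have hk' : k < T := Finset.mem_range.1 hk
      have he : (2 * (len - 1 - (k : Int))).toNat = 2 * ((T - 1 - k) + (T + R)) := by omega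
      rw [he, pow_mul, show ((2 : Int) ^ 2) = 4 by norm_num, pow_add]
      ring
    have h2 : ∑ i ∈ Finset.range T, PySem.Int.band (K >>> (3 * (i : Int) + 1).toNat) 1 * 4 ^ (T - 1 - i) * 4 ^ R
        = ∑ i ∈ Finset.range T, PySem.Int.band (K >>> (3 * (i : Int) + 1).toNat) 1 * 2 ^ (2 * (len - 1 - (T : Int) - (i : Int))).toNat := by
      refine Finset.sum_congr rfl ?_
      intro k hk
      have hk' : k < T := Finset.mem_range.1 hk
      have he : (2 * (len - 1 - (T : Int) - (k : Int))).toNat = 2 * ((T - 1 - k) + R) := by omega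
      rw [he, pow_mul, show ((2 : Int) ^ 2) = 4 by norm_num, pow_add]
      ring
    have h3 : ∑ i ∈ Finset.range R, PySem.Int.band (K >>> (3 * (i : Int) + 2).toNat) 1 * 4 ^ (R - 1 - i)
        = ∑ i ∈ Finset.range R, PySem.Int.band (K >>> (3 * (i : Int) + 2).toNat) 1 * 2 ^ (2 * (len - 1 - 2 * (T : Int) - (i : Int))).toNat := by
      refine Finset.sum_congr rfl ?_
      intro k hk
      have hk' : k < R := Finset.mem_range.1 hk
      have he : (2 * (len - 1 - 2 * (T : Int) - (k : Int))).toNat = 2 * (R - 1 - k) := by omega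
      rw [he, pow_mul, show ((2 : Int) ^ 2) = 4 by norm_num]
    rw [h1, h2, h3]
    ring

-- ===== VERDICT (by name: the statement is the Claim_ definition above) =====
theorem Cascade_Tran_spec : Claim_equal_Cascade_Tran := by
  intro K len _
  unfold Spec_Cascade_Tran
  exact cascade_main K len
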